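-- pv_equiv track=rewrite | github.com/DailyCommitStudy/Lims-practice-repository | programmers/코딩 기초 트레이닝/day16_4.py | solution
-- ===== SOURCE A (Python) =====
-- def solution(myString):
--     answer = ''
--     for i in myString:                       #
--         if i == 'a':
--             answer += i.upper()
--         elif i != 'A':
--             answer += i.lower()
--         else:
--             answer += i                     #
--     return answer
-- ===== SOURCE B (Python) =====
-- def solution(myString):
--     return myString.lower().replace('a', 'A')
-- ===== Notes on version B (the rewrite author's own statement) =====
-- stated objective: idiomatic
-- what changed: Replaces the per-character branching loop with two whole-string builtin passes: lowercase everything, then replace every 'a' with 'A'.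
import Mathlib
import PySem

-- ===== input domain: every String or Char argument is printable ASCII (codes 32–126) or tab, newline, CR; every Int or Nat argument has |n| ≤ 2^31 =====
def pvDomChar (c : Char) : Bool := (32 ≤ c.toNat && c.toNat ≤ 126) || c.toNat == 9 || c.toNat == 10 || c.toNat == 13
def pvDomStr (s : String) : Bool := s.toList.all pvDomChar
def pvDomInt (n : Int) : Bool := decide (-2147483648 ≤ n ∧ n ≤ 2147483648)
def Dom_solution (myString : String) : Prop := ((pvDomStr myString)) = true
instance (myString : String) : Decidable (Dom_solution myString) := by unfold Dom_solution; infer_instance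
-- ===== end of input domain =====

-- B replaces A's per-character branching loop with two whole-string passes: lower() then replace('a','A').

-- ===== PORT A =====
-- the Python loop: answer accumulates one transformed character per step
def solutionGo : List Char → List Char → List Char
  | acc, [] => acc
  | acc, c :: t =>
      solutionGo
        (acc ++ (if c = 'a' then [PySem.Chars.upperChar c]
                 else if c ≠ 'A' then [PySem.Chars.lowerChar c]
                 else [c])) t

def solution (myString : String) : String :=
  String.ofList (solutionGo [] myString.toList)

-- ===== PORT B =====
def solution_alt (myString : String) : String :=
  PySem.Str.replace (PySem.Str.lower myString) "a" "A"

-- ===== PRECONDITION & SPEC =====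
def Spec_solution (myString : String) (out : String) : Prop := out = solution_alt myString
instance (myString : String) (out : String) : Decidable (Spec_solution myString out) := by unfold Spec_solution; infer_instance

-- ===== CLAIM (what is proved, stated in full; the proofs are below) =====
def Claim_equal_solution : Prop := ∀ (myString : String), Dom_solution myString → Spec_solution myString (solution myString)

-- ===== LEMMAS AND PROOFS =====

-- replace with the one-character pattern ['a'] is a pointwise substitution
lemma go_single (l : List Char) (fuel : Nat) (acc : List Char) (h : l.length ≤ fuel) :
    PySem.Chars.replace.go ['a'] ['A'] fuel l acc
      = acc.reverse ++ l.map (fun c => if c = 'a' then 'A' else c) := by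
  induction l generalizing fuel acc with
  | nil => cases fuel <;> simp [PySem.Chars.replace.go]
  | cons c t ih =>
      cases fuel with
      | zero => simp at h
      | succ f =>
          simp only [List.length_cons, Nat.succ_le_succ_iff] at h
          by_cases hc : c = 'a'
          · subst hc
            rw [show PySem.Chars.replace.go ['a'] ['A'] (f+1) ('a' :: t) acc
                  = PySem.Chars.replace.go ['a'] ['A'] f t ('A' :: acc) by
                  simp [PySem.Chars.replace.go, List.isPrefixOf]]
            rw [ih f ('A' :: acc) h]; simp
          · have hpre : List.isPrefixOf ['a'] (c :: t) = false := by
              simp only [List.isPrefixOf, Bool.and_eq_false_iff, beq_eq_false_iff_ne, ne_eq]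
              exact Or.inl fun h => hc h.symm
            rw [show PySem.Chars.replace.go ['a'] ['A'] (f+1) (c :: t) acc
                  = PySem.Chars.replace.go ['a'] ['A'] f t (c :: acc) by
                  simp [PySem.Chars.replace.go, hpre]]
            rw [ih f (c :: acc) h]; simp [hc]

-- A's accumulator loop is a map
lemma solutionGo_eq (l acc : List Char) :
    solutionGo acc l
      = acc ++ l.map (fun c => if c = 'a' then PySem.Chars.upperChar c
                               else if c ≠ 'A' then PySem.Chars.lowerChar c
                               else c) := by
  induction l generalizing acc with
  | nil => simp [solutionGo]
  | cons c t ih =>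
      rw [solutionGo, ih]
      split_ifs <;> simp_all

-- per character, lower-then-substitute agrees with A's three-way branch
lemma char_step (c : Char) :
    (if PySem.Chars.lowerChar c = 'a' then 'A' else PySem.Chars.lowerChar c)
      = (if c = 'a' then PySem.Chars.upperChar c
         else if c ≠ 'A' then PySem.Chars.lowerChar c
         else c) := by
  by_cases ha : c = 'a'
  · subst ha; decide
  · by_cases hA : c = 'A'
    · subst hA; decide
    · simp only [ha, hA, if_false, ne_eq, not_false_eq_true, if_true]
      have hne : PySem.Chars.lowerChar c ≠ 'a' := by
        unfold PySem.Chars.lowerChar PySem.Chars.isupper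
        split_ifs with hup
        · intro hcontra
          simp only [Bool.and_eq_true, decide_eq_true_eq] at hup
          have h65 : (65 : Nat) ≤ c.toNat := hup.1
          have h90 : c.toNat ≤ (90 : Nat) := hup.2
          have hval := congrArg Char.toNat hcontra
          rw [Char.toNat_ofNat] at hval
          rw [if_pos (by constructor; omega)] at hval
          have h97 : ('a' : Char).toNat = 97 := by decide
          have hc65 : c.toNat = ('A' : Char).toNat := by
            have : ('A' : Char).toNat = 65 := by decide
            omega
          exact hA (Char.ext (UInt32.toNat_inj.mp hc65))
        · exact ha
      simp [hne]

-- ===== VERDICT (by name: the statement is the Claim_ definition above) =====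
theorem solution_spec : Claim_equal_solution := by
  intro s _
  unfold Spec_solution solution solution_alt
  apply String.ext
  rw [String.toList_ofList]
  rw [PySem.Str.toList_replace, PySem.Str.toList_lower]
  show solutionGo [] s.toList = PySem.Chars.replace (PySem.Chars.lower s.toList) "a".toList "A".toList
  rw [solutionGo_eq]
  unfold PySem.Chars.replace PySem.Chars.lower
  simp only [show ("a".toList) = ['a'] from rfl, show ("A".toList) = ['A'] from rfl,
    List.isEmpty_cons]
  rw [go_single _ _ _ (by simp)]
  rw [List.map_map]
  exact List.map_congr_left fun c _ => (char_step c).symm
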